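-- pv_equiv track=rewrite | github.com/ShrikantLambe/Pipeline_Sentinel | agents/blast_radius.py | _all_downstream_consumers
-- ===== SOURCE A (Python) =====
-- DEPENDENCY_GRAPH: dict[str, dict] = {
--     "extract_source_data": {
--         "assets": ["raw.orders", "raw.customers", "raw.products"],
--         "level":  "raw",
--         "downstream_tasks": ["validate_raw_schema", "load_to_staging"],
--     },
--     "validate_raw_schema": {
--         "assets": ["raw.orders"],
--         "level":  "raw",
--         "downstream_tasks": ["load_to_staging"],
--     },
--     "load_to_staging": {
--         "assets": ["stg.orders", "stg.customers"],
--         "level":  "staging",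
--         "downstream_tasks": ["run_dbt_staging_models"],
--     },
--     "run_dbt_staging_models": {
--         "assets": ["stg_orders", "stg_customers", "stg_products"],
--         "level":  "staging",
--         "downstream_tasks": ["run_dbt_mart_models", "run_dbt_tests"],
--     },
--     "run_dbt_mart_models": {
--         "assets": ["fct_orders", "fct_sales", "dim_customers"],
--         "level":  "mart",
--         "downstream_tasks": ["run_dbt_tests", "update_snowflake_aggregates"],
--     },
--     "run_dbt_tests": {
--         "assets": ["fct_orders", "fct_sales"],
--         "level":  "mart",
--         "downstream_tasks": ["update_snowflake_aggregates"],
--     },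
--     "update_snowflake_aggregates": {
--         "assets": ["agg_daily_sales", "agg_customer_ltv"],
--         "level":  "mart",
--         "downstream_tasks": ["refresh_bi_cache"],
--         "consumers": ["executive_dashboard", "ml_revenue_forecast", "sla_weekly_sales"],
--     },
--     "refresh_bi_cache": {
--         "assets": ["bi_cache"],
--         "level":  "consumer",
--         "consumers": ["executive_dashboard", "stakeholder_reports", "ml_churn_model"],
--     },
-- }
--
-- def _all_downstream_consumers(task_id: str) -> set[str]:
--     """BFS over DEPENDENCY_GRAPH to collect every consumer reachable from task_id."""
--     visited_tasks: set[str] = set()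
--     consumers: set[str]     = set()
--     queue = [task_id]
--
--     while queue:
--         current = queue.pop()
--         if current in visited_tasks:
--             continue
--         visited_tasks.add(current)
--         node = DEPENDENCY_GRAPH.get(current, {})
--         consumers.update(node.get("consumers", []))
--         for next_task in node.get("downstream_tasks", []):
--             if next_task not in visited_tasks:
--                 queue.append(next_task)
--
--     return consumers
-- ===== SOURCE B (Python) =====
-- DEPENDENCY_GRAPH: dict[str, dict] = {
--     "extract_source_data": {
--         "assets": ["raw.orders", "raw.customers", "raw.products"],
--         "level":  "raw",
--         "downstream_tasks": ["validate_raw_schema", "load_to_staging"],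
--     },
--     "validate_raw_schema": {
--         "assets": ["raw.orders"],
--         "level":  "raw",
--         "downstream_tasks": ["load_to_staging"],
--     },
--     "load_to_staging": {
--         "assets": ["stg.orders", "stg.customers"],
--         "level":  "staging",
--         "downstream_tasks": ["run_dbt_staging_models"],
--     },
--     "run_dbt_staging_models": {
--         "assets": ["stg_orders", "stg_customers", "stg_products"],
--         "level":  "staging",
--         "downstream_tasks": ["run_dbt_mart_models", "run_dbt_tests"],
--     },
--     "run_dbt_mart_models": {
--         "assets": ["fct_orders", "fct_sales", "dim_customers"],
--         "level":  "mart",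
--         "downstream_tasks": ["run_dbt_tests", "update_snowflake_aggregates"],
--     },
--     "run_dbt_tests": {
--         "assets": ["fct_orders", "fct_sales"],
--         "level":  "mart",
--         "downstream_tasks": ["update_snowflake_aggregates"],
--     },
--     "update_snowflake_aggregates": {
--         "assets": ["agg_daily_sales", "agg_customer_ltv"],
--         "level":  "mart",
--         "downstream_tasks": ["refresh_bi_cache"],
--         "consumers": ["executive_dashboard", "ml_revenue_forecast", "sla_weekly_sales"],
--     },
--     "refresh_bi_cache": {
--         "assets": ["bi_cache"],
--         "level":  "consumer",
--         "consumers": ["executive_dashboard", "stakeholder_reports", "ml_churn_model"],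
--     },
-- }
--
-- def _all_downstream_consumers(task_id: str) -> set[str]:
--     """Recursive DFS over DEPENDENCY_GRAPH collecting every reachable consumer."""
--     visited: set[str] = set()
--     consumers: set[str] = set()
--
--     def _visit(current: str) -> None:
--         if current in visited:
--             return
--         visited.add(current)
--         node = DEPENDENCY_GRAPH.get(current, {})
--         consumers.update(node.get("consumers", []))
--         for next_task in node.get("downstream_tasks", []):
--             _visit(next_task)
--
--     _visit(task_id)
--     return consumers
-- ===== Notes on version B (the rewrite author's own statement) =====
-- stated objective: idiomatic
-- what changed: A's explicit worklist/stack loop with a visited-before-push guard is replaced by a recursive DFS helper that checks visited on entry and recurses on each downstream task.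
import Mathlib
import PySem

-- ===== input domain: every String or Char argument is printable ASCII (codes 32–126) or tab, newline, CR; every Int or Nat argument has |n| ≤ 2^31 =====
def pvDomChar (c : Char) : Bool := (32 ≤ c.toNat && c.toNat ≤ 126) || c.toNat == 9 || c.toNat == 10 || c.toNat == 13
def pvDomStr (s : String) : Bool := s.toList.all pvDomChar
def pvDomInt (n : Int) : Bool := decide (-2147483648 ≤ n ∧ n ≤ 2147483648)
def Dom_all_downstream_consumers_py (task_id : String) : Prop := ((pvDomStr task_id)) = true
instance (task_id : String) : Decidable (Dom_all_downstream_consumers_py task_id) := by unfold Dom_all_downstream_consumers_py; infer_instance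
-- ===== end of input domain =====

-- B replaces A's explicit stack/worklist loop by a recursive DFS helper (same decomposition goal: clearer structure; no speed claim).
-- The output is a Python set (PySem.Set, distinct elements); equality proved is exact list equality of the two ports' results.

-- ===== PORT A =====
-- Shared module constant DEPENDENCY_GRAPH, reduced to the two fields the function reads:
-- (consumers, downstream_tasks) per key ("assets"/"level" are never read).
def depGraph : List (String × (List String × List String)) :=
  [ ("extract_source_data",        ([], ["validate_raw_schema", "load_to_staging"])),
    ("validate_raw_schema",        ([], ["load_to_staging"])),
    ("load_to_staging",            ([], ["run_dbt_staging_models"])),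
    ("run_dbt_staging_models",     ([], ["run_dbt_mart_models", "run_dbt_tests"])),
    ("run_dbt_mart_models",        ([], ["run_dbt_tests", "update_snowflake_aggregates"])),
    ("run_dbt_tests",              ([], ["update_snowflake_aggregates"])),
    ("update_snowflake_aggregates",
      (["executive_dashboard", "ml_revenue_forecast", "sla_weekly_sales"], ["refresh_bi_cache"])),
    ("refresh_bi_cache",
      (["executive_dashboard", "stakeholder_reports", "ml_churn_model"], [])) ]

-- DEPENDENCY_GRAPH.get(current, {}) followed by node.get("consumers"/"downstream_tasks", [])
def nodeOf (t : String) : List String × List String := (depGraph.lookup t).getD ([], [])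

-- A's while loop over the queue (Python pops from the END: head of this list is the stack top;
-- appended downstream tasks are reversed so the last-appended is popped first).
-- The fuel argument only makes the loop total: 100 exceeds the number of possible pops
-- (1 + total length of all downstream lists = 11), so it is never exhausted.
def aLoop : Nat → List String → PySem.Set String → PySem.Set String → PySem.Set String
  | 0, _, _, consumers => consumers
  | _ + 1, [], _, consumers => consumers
  | fuel + 1, current :: rest, visited, consumers =>
    if PySem.Set.contains visited current then
      aLoop fuel rest visited consumers
    else
      let node := nodeOf current
      let visited' := PySem.Set.add visited current
      let consumers' := PySem.Set.update consumers node.1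
      let pushed := (node.2.filter (fun t => !(PySem.Set.contains visited' t))).reverse
      aLoop fuel (pushed ++ rest) visited' consumers'

def all_downstream_consumers_py (task_id : String) : List String :=
  aLoop 100 [task_id] PySem.Set.empty PySem.Set.empty

-- ===== PORT B =====
-- Recursive DFS: state = (visited, consumers); fuel (≥ recursion depth, bounded by the 8 graph
-- keys + 1) only makes the recursion total and is never exhausted.
def bVisit : Nat → String → PySem.Set String × PySem.Set String → PySem.Set String × PySem.Set String
  | 0, _, st => st
  | fuel + 1, current, (visited, consumers) =>
    if PySem.Set.contains visited current then (visited, consumers)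
    else
      let node := nodeOf current
      let st' := (PySem.Set.add visited current, PySem.Set.update consumers node.1)
      node.2.foldl (fun st t => bVisit fuel t st) st'

def all_downstream_consumers_py_alt (task_id : String) : List String :=
  (bVisit 100 task_id (PySem.Set.empty, PySem.Set.empty)).2

-- ===== PRECONDITION & SPEC =====
def Spec_all_downstream_consumers_py (task_id : String) (out : List String) : Prop := out = all_downstream_consumers_py_alt task_id
instance (task_id : String) (out : List String) : Decidable (Spec_all_downstream_consumers_py task_id out) := by unfold Spec_all_downstream_consumers_py; infer_instance

-- ===== CLAIM (what is proved, stated in full; the proofs are below) =====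
def Claim_equal_all_downstream_consumers_py : Prop := ∀ (task_id : String), Dom_all_downstream_consumers_py task_id → Spec_all_downstream_consumers_py task_id (all_downstream_consumers_py task_id)

-- ===== LEMMAS AND PROOFS =====

-- The empty queue returns the consumers set at any fuel.
theorem aLoop_nil (fuel : Nat) (v c : PySem.Set String) : aLoop fuel [] v c = c := by
  cases fuel <;> rfl

-- A task id that is not a key of the graph maps to the empty node.
theorem nodeOf_of_not_key (t : String)
    (h1 : t ≠ "extract_source_data") (h2 : t ≠ "validate_raw_schema")
    (h3 : t ≠ "load_to_staging") (h4 : t ≠ "run_dbt_staging_models")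
    (h5 : t ≠ "run_dbt_mart_models") (h6 : t ≠ "run_dbt_tests")
    (h7 : t ≠ "update_snowflake_aggregates") (h8 : t ≠ "refresh_bi_cache") :
    nodeOf t = ([], []) := by
  have e1 : (t == "extract_source_data") = false := beq_eq_false_iff_ne.mpr h1
  have e2 : (t == "validate_raw_schema") = false := beq_eq_false_iff_ne.mpr h2
  have e3 : (t == "load_to_staging") = false := beq_eq_false_iff_ne.mpr h3
  have e4 : (t == "run_dbt_staging_models") = false := beq_eq_false_iff_ne.mpr h4
  have e5 : (t == "run_dbt_mart_models") = false := beq_eq_false_iff_ne.mpr h5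
  have e6 : (t == "run_dbt_tests") = false := beq_eq_false_iff_ne.mpr h6
  have e7 : (t == "update_snowflake_aggregates") = false := beq_eq_false_iff_ne.mpr h7
  have e8 : (t == "refresh_bi_cache") = false := beq_eq_false_iff_ne.mpr h8
  simp [nodeOf, depGraph, List.lookup, e1, e2, e3, e4, e5, e6, e7, e8]

-- ===== VERDICT (by name: the statement is the Claim_ definition above) =====
theorem all_downstream_consumers_py_spec : Claim_equal_all_downstream_consumers_py := by
  intro t _
  unfold Spec_all_downstream_consumers_py
  by_cases h1 : t = "extract_source_data"; · subst h1; decide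
  by_cases h2 : t = "validate_raw_schema"; · subst h2; decide
  by_cases h3 : t = "load_to_staging"; · subst h3; decide
  by_cases h4 : t = "run_dbt_staging_models"; · subst h4; decide
  by_cases h5 : t = "run_dbt_mart_models"; · subst h5; decide
  by_cases h6 : t = "run_dbt_tests"; · subst h6; decide
  by_cases h7 : t = "update_snowflake_aggregates"; · subst h7; decide
  by_cases h8 : t = "refresh_bi_cache"; · subst h8; decide
  have hn := nodeOf_of_not_key t h1 h2 h3 h4 h5 h6 h7 h8
  show aLoop (99 + 1) [t] PySem.Set.empty PySem.Set.empty
      = (bVisit (99 + 1) t (PySem.Set.empty, PySem.Set.empty)).2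
  rw [aLoop, bVisit]
  simp [hn, PySem.Set.contains, PySem.Set.empty, PySem.Set.update, aLoop_nil]
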